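-- pv_equiv track=rewrite | github.com/dennisladefoged/wireless-report | get_wifi_clients_v2.py | summarize_capabilities
-- ===== SOURCE A (Python) =====
-- from collections import Counter
--
-- def summarize_capabilities(clients):
--     stats = {
--         "802.11k Support": Counter(),
--         "802.11v Support": Counter(),
--         "802.11r Support": Counter(),
--         "MIMO Mode": Counter(),
--         "Radio Type": Counter()
--     }
--     for client in clients:
--         if not isinstance(client, dict):
--             continue
--         stats["802.11k Support"][str(client.get("11k_capable", False))] += 1
--         stats["802.11v Support"][str(client.get("11v_capable", False))] += 1
--         stats["802.11r Support"][str(client.get("11r_capable", False))] += 1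
--         stats["MIMO Mode"][client.get("mimo", "Unknown")] += 1
--         stats["Radio Type"][client.get("radio_type", "Unknown")] += 1
--     return stats
-- ===== SOURCE B (Python) =====
-- from collections import Counter
--
-- def summarize_capabilities(clients):
--     # Dedup-then-count: no incremental counter updates at all. For each column we
--     # list the distinct values in first-occurrence order (dict.fromkeys) and pair
--     # each with its total via list.count, then wrap as a Counter.
--     valid = [c for c in clients if isinstance(c, dict)]
--
--     def tally(vals):
--         return Counter({v: vals.count(v) for v in dict.fromkeys(vals)})
--
--     return {
--         "802.11k Support": tally([str(c.get("11k_capable", False)) for c in valid]),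
--         "802.11v Support": tally([str(c.get("11v_capable", False)) for c in valid]),
--         "802.11r Support": tally([str(c.get("11r_capable", False)) for c in valid]),
--         "MIMO Mode": tally([c.get("mimo", "Unknown") for c in valid]),
--         "Radio Type": tally([c.get("radio_type", "Unknown") for c in valid]),
--     }
-- ===== Notes on version B (the rewrite author's own statement) =====
-- stated objective: alternative
-- what changed: A's single pass that increments five Counters per client is replaced by a dedup-then-count scheme: each column's distinct values are listed in first-occurrence order and each is paired with its total computed by a list.count scan, with no incremental counter updates anywhere.
import Mathlib
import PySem

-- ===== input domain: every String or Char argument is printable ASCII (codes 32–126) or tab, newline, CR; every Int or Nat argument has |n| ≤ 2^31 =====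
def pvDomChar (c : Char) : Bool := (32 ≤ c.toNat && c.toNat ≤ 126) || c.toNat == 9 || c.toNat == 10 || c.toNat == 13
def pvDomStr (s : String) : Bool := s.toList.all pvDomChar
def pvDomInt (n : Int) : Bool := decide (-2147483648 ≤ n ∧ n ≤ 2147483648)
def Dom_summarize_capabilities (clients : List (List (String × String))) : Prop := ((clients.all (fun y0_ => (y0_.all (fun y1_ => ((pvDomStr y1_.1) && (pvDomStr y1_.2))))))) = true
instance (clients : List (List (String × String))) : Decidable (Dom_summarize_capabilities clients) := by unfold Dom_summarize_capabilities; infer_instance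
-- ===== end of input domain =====

-- B replaces A's incremental per-client counter updates by dedup-then-count: distinct values
-- of each column in first-occurrence order, each paired with its count by a scan (objective:
-- alternative). Under the type convention every client IS a dict, so Python's isinstance
-- filter admits all elements; str() applied to the (string) stored value is the identity, and
-- the missing-key defaults False / "Unknown" appear as the strings "False" / "Unknown".

-- ===== PORT A =====
-- one loop iteration of A: bump all five counters inside the stats dict for one client
def pvStepA (stats : PySem.Dict String (PySem.Dict String Int))
    (client : List (String × String)) : PySem.Dict String (PySem.Dict String Int) :=
  let c := PySem.Dict.mk client
  let stats := stats.modify "802.11k Support" .empty (fun d => d.modify (c.getD "11k_capable" "False") 0 (· + 1))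
  let stats := stats.modify "802.11v Support" .empty (fun d => d.modify (c.getD "11v_capable" "False") 0 (· + 1))
  let stats := stats.modify "802.11r Support" .empty (fun d => d.modify (c.getD "11r_capable" "False") 0 (· + 1))
  let stats := stats.modify "MIMO Mode" .empty (fun d => d.modify (c.getD "mimo" "Unknown") 0 (· + 1))
  stats.modify "Radio Type" .empty (fun d => d.modify (c.getD "radio_type" "Unknown") 0 (· + 1))

def summarize_capabilities (clients : List (List (String × String))) : List (String × List (String × Int)) :=
  let stats : PySem.Dict String (PySem.Dict String Int) :=
    PySem.Dict.mk [("802.11k Support", .empty), ("802.11v Support", .empty),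
                   ("802.11r Support", .empty), ("MIMO Mode", .empty), ("Radio Type", .empty)]
  let stats := clients.foldl pvStepA stats
  stats.items.map (fun kv => (kv.1, kv.2.items))

-- ===== PORT B =====
-- the one column [str-or-default for c in valid]
def pvColumn (valid : List (List (String × String))) (key dflt : String) : List String :=
  valid.map (fun c => (PySem.Dict.mk c).getD key dflt)

-- tally(vals) = Counter({v: vals.count(v) for v in dict.fromkeys(vals)})
def pvTally (vals : List String) : List (String × Int) :=
  (PySem.List.dedup vals).map (fun v => (v, (vals.count v : Int)))

def summarize_capabilities_alt (clients : List (List (String × String))) : List (String × List (String × Int)) :=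
  -- valid = [c for c in clients if isinstance(c, dict)]: identity under the type convention
  let valid := clients
  [("802.11k Support", pvTally (pvColumn valid "11k_capable" "False")),
   ("802.11v Support", pvTally (pvColumn valid "11v_capable" "False")),
   ("802.11r Support", pvTally (pvColumn valid "11r_capable" "False")),
   ("MIMO Mode", pvTally (pvColumn valid "mimo" "Unknown")),
   ("Radio Type", pvTally (pvColumn valid "radio_type" "Unknown"))]

-- ===== PRECONDITION & SPEC =====
def Spec_summarize_capabilities (clients : List (List (String × String))) (out : List (String × List (String × Int))) : Prop := out = summarize_capabilities_alt clients
instance (clients : List (List (String × String))) (out : List (String × List (String × Int))) : Decidable (Spec_summarize_capabilities clients out) := by unfold Spec_summarize_capabilities; infer_instance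

-- ===== CLAIM (what is proved, stated in full; the proofs are below) =====
def Claim_equal_summarize_capabilities : Prop := ∀ (clients : List (List (String × String))), Dom_summarize_capabilities clients → Spec_summarize_capabilities clients (summarize_capabilities clients)

-- ===== LEMMAS AND PROOFS =====

-- one column of A's fold, starting from an arbitrary counter
def pvColFold (cs : List (List (String × String))) (key dflt : String)
    (c0 : PySem.Dict String Int) : PySem.Dict String Int :=
  cs.foldl (fun d c => d.modify ((PySem.Dict.mk c).getD key dflt) 0 (· + 1)) c0

-- A's interleaved fold over the five-key stats dict decomposes into five independent column folds
theorem pvLoop (cs : List (List (String × String)))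
    (c1 c2 c3 c4 c5 : PySem.Dict String Int) :
    cs.foldl pvStepA
      (PySem.Dict.mk [("802.11k Support", c1), ("802.11v Support", c2),
                      ("802.11r Support", c3), ("MIMO Mode", c4), ("Radio Type", c5)])
    = PySem.Dict.mk [("802.11k Support", pvColFold cs "11k_capable" "False" c1),
                     ("802.11v Support", pvColFold cs "11v_capable" "False" c2),
                     ("802.11r Support", pvColFold cs "11r_capable" "False" c3),
                     ("MIMO Mode", pvColFold cs "mimo" "Unknown" c4),
                     ("Radio Type", pvColFold cs "radio_type" "Unknown" c5)] := by
  induction cs generalizing c1 c2 c3 c4 c5 with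
  | nil => rfl
  | cons c cs ih =>
      show cs.foldl pvStepA (pvStepA _ c) = _
      rw [show pvStepA (PySem.Dict.mk [("802.11k Support", c1), ("802.11v Support", c2),
            ("802.11r Support", c3), ("MIMO Mode", c4), ("Radio Type", c5)]) c
          = PySem.Dict.mk
              [("802.11k Support", c1.modify ((PySem.Dict.mk c).getD "11k_capable" "False") 0 (· + 1)),
               ("802.11v Support", c2.modify ((PySem.Dict.mk c).getD "11v_capable" "False") 0 (· + 1)),
               ("802.11r Support", c3.modify ((PySem.Dict.mk c).getD "11r_capable" "False") 0 (· + 1)),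
               ("MIMO Mode", c4.modify ((PySem.Dict.mk c).getD "mimo" "Unknown") 0 (· + 1)),
               ("Radio Type", c5.modify ((PySem.Dict.mk c).getD "radio_type" "Unknown") 0 (· + 1))] from rfl,
          ih]
      rfl

-- A's column fold from empty is Counter(column); its items are B's dedup-then-count tally
theorem pvColFold_items (cs : List (List (String × String))) (key dflt : String) :
    (pvColFold cs key dflt .empty).items = pvTally (pvColumn cs key dflt) := by
  have h : pvColFold cs key dflt .empty = PySem.Dict.counter (pvColumn cs key dflt) := by
    rw [PySem.Dict.counter_eq_foldl, pvColumn, List.foldl_map]; rfl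
  rw [h, PySem.Dict.items_counter, pvTally, PySem.List.dedup_eq_ofList]

-- ===== VERDICT (by name: the statement is the Claim_ definition above) =====
theorem summarize_capabilities_spec : Claim_equal_summarize_capabilities := by
  intro clients _
  show summarize_capabilities clients = summarize_capabilities_alt clients
  rw [summarize_capabilities, summarize_capabilities_alt]
  simp only [pvLoop]
  show List.map (fun kv => (kv.1, kv.2.items))
      [("802.11k Support", pvColFold clients "11k_capable" "False" .empty),
       ("802.11v Support", pvColFold clients "11v_capable" "False" .empty),
       ("802.11r Support", pvColFold clients "11r_capable" "False" .empty),
       ("MIMO Mode", pvColFold clients "mimo" "Unknown" .empty),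
       ("Radio Type", pvColFold clients "radio_type" "Unknown" .empty)] = _
  simp only [List.map_cons, List.map_nil, pvColFold_items]
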